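-- pv_equiv track=rewrite | github.com/clarud/SentinelAI | database/metadata_tagger_2.py | determine_source_type
-- ===== SOURCE A (Python) =====
-- from typing import Dict, Any, List, Optional
--
-- def determine_source_type(file_info: Dict[str, Any]) -> str:
--     """Determine the source type based on file information"""
--     filename = file_info.get('filename', '').lower()
--     filepath = file_info.get('filepath', '').lower()
--     file_extension = file_info.get('file_extension', '').lower()
--
--     # Check file extension first
--     if file_extension == '.pdf':
--         if any(keyword in filename for keyword in ['email', 'message', 'mail']):
--             return 'email_pdf'
--         elif any(keyword in filename for keyword in ['invoice', 'receipt', 'bill']):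
--             return 'invoice_pdf'
--         elif any(keyword in filename for keyword in ['report', 'document', 'form']):
--             return 'document_pdf'
--         else:
--             return 'pdf'
--
--     elif file_extension == '.csv':
--         return 'csv_data'
--
--     elif file_extension == '.txt':
--         if any(keyword in filename for keyword in ['email', 'message']):
--             return 'email_text'
--         elif any(keyword in filename for keyword in ['log', 'transcript']):
--             return 'log_text'
--         else:
--             return 'text'
--
--     # Check for email-like content patterns
--     elif 'email' in filename or 'message' in filename:
--         return 'email'
--
--     # Check for web-related content
--     elif any(keyword in filename for keyword in ['web', 'html', 'url', 'website']):
--         return 'website'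
--
--     # Default fallback
--     return 'unknown'
-- ===== SOURCE B (Python) =====
-- # B: uniform rule list with a catch-all entry; one generic selection scan, then a
-- # reverse accumulator fold over the selected rule's keyword groups (no early returns,
-- # checks run back-to-front and earlier groups overwrite later ones).
-- RULES = [
--     ('.pdf', [(('email', 'message', 'mail'), 'email_pdf'),
--               (('invoice', 'receipt', 'bill'), 'invoice_pdf'),
--               (('report', 'document', 'form'), 'document_pdf')], 'pdf'),
--     ('.csv', [], 'csv_data'),
--     ('.txt', [(('email', 'message'), 'email_text'),
--               (('log', 'transcript'), 'log_text')], 'text'),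
--     (None, [(('email', 'message'), 'email'),
--             (('web', 'html', 'url', 'website'), 'website')], 'unknown'),
-- ]
--
--
-- def determine_source_type(file_info):
--     filename = file_info.get('filename', '').lower()
--     ext = file_info.get('file_extension', '').lower()
--     groups, label = next((g, d) for e, g, d in RULES if e is None or e == ext)
--     for keywords, lab in reversed(groups):
--         if any(k in filename for k in keywords):
--             label = lab
--     return label
-- ===== Notes on version B (the rewrite author's own statement) =====
-- stated objective: alternative
-- what changed: Replaces A's early-return if/elif cascade with a uniform rule list (catch-all entry included) selected by one generic scan, and resolves keyword precedence by folding the selected rule's groups in REVERSE order into an accumulator that earlier groups overwrite, instead of first-match early returns.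
import Mathlib
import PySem

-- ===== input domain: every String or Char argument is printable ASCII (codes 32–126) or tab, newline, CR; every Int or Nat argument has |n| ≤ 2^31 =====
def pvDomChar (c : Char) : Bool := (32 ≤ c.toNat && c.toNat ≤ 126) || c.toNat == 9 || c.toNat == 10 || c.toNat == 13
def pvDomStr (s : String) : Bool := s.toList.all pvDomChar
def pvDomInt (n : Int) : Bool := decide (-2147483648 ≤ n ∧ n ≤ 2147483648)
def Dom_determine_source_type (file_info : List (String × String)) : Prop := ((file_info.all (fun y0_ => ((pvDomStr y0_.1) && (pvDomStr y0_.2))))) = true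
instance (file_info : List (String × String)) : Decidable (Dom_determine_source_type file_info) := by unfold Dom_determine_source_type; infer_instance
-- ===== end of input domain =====

-- B replaces A's early-return cascade with a uniform rule list (catch-all included) and a
-- reverse accumulator fold over the selected rule's keyword groups. Same return value everywhere.

-- ===== PORT A =====
def determine_source_type (file_info : List (String × String)) : String :=
  let d := PySem.Dict.ofList file_info
  let filename := PySem.Str.lower (d.getD "filename" "")
  let _filepath := PySem.Str.lower (d.getD "filepath" "")
  let file_extension := PySem.Str.lower (d.getD "file_extension" "")
  if file_extension == ".pdf" then
    if ["email", "message", "mail"].any (fun k => PySem.Str.isIn k filename) then "email_pdf"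
    else if ["invoice", "receipt", "bill"].any (fun k => PySem.Str.isIn k filename) then "invoice_pdf"
    else if ["report", "document", "form"].any (fun k => PySem.Str.isIn k filename) then "document_pdf"
    else "pdf"
  else if file_extension == ".csv" then "csv_data"
  else if file_extension == ".txt" then
    if ["email", "message"].any (fun k => PySem.Str.isIn k filename) then "email_text"
    else if ["log", "transcript"].any (fun k => PySem.Str.isIn k filename) then "log_text"
    else "text"
  else if PySem.Str.isIn "email" filename || PySem.Str.isIn "message" filename then "email"
  else if ["web", "html", "url", "website"].any (fun k => PySem.Str.isIn k filename) then "website"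
  else "unknown"

-- ===== PORT B =====
-- the RULES list: (extension key or catch-all None, keyword groups, default label)
def pvRules : List (Option String × List (List String × String) × String) :=
  [(some ".pdf", [(["email", "message", "mail"], "email_pdf"),
                  (["invoice", "receipt", "bill"], "invoice_pdf"),
                  (["report", "document", "form"], "document_pdf")], "pdf"),
   (some ".csv", [], "csv_data"),
   (some ".txt", [(["email", "message"], "email_text"),
                  (["log", "transcript"], "log_text")], "text"),
   (none, [(["email", "message"], "email"),
           (["web", "html", "url", "website"], "website")], "unknown")]

def determine_source_type_alt (file_info : List (String × String)) : String :=
  let d := PySem.Dict.ofList file_info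
  let filename := PySem.Str.lower (d.getD "filename" "")
  let ext := PySem.Str.lower (d.getD "file_extension" "")
  match pvRules.find? (fun r => r.1.elim true (fun e => e == ext)) with
  | some (_, groups, label0) =>
      -- 'for keywords, lab in reversed(groups): if any(...): label = lab'
      groups.reverse.foldl
        (fun label g => if g.1.any (fun k => PySem.Str.isIn k filename) then g.2 else label)
        label0
  | none => "unknown"  -- unreachable totality guard: the catch-all (none) entry always matches

-- ===== PRECONDITION & SPEC =====
def Spec_determine_source_type (file_info : List (String × String)) (out : String) : Prop := out = determine_source_type_alt file_info
instance (file_info : List (String × String)) (out : String) : Decidable (Spec_determine_source_type file_info out) := by unfold Spec_determine_source_type; infer_instance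

-- ===== CLAIM (what is proved, stated in full; the proofs are below) =====
def Claim_equal_determine_source_type : Prop := ∀ (file_info : List (String × String)), Dom_determine_source_type file_info → Spec_determine_source_type file_info (determine_source_type file_info)

-- ===== LEMMAS AND PROOFS =====
lemma core_eq (filename ext : String) :
    (if ext == ".pdf" then
      if ["email", "message", "mail"].any (fun k => PySem.Str.isIn k filename) then "email_pdf"
      else if ["invoice", "receipt", "bill"].any (fun k => PySem.Str.isIn k filename) then "invoice_pdf"
      else if ["report", "document", "form"].any (fun k => PySem.Str.isIn k filename) then "document_pdf"
      else "pdf"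
    else if ext == ".csv" then "csv_data"
    else if ext == ".txt" then
      if ["email", "message"].any (fun k => PySem.Str.isIn k filename) then "email_text"
      else if ["log", "transcript"].any (fun k => PySem.Str.isIn k filename) then "log_text"
      else "text"
    else if PySem.Str.isIn "email" filename || PySem.Str.isIn "message" filename then "email"
    else if ["web", "html", "url", "website"].any (fun k => PySem.Str.isIn k filename) then "website"
    else "unknown") =
    (match pvRules.find? (fun r => r.1.elim true (fun e => e == ext)) with
     | some (_, groups, label0) =>
         groups.reverse.foldl
           (fun label g => if g.1.any (fun k => PySem.Str.isIn k filename) then g.2 else label)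
           label0
     | none => "unknown") := by
  by_cases h1 : ext = ".pdf"
  · subst h1; simp [pvRules, List.foldl, List.any]
  · by_cases h2 : ext = ".csv"
    · subst h2; simp [pvRules, List.find?]
    · by_cases h3 : ext = ".txt"
      · subst h3; simp [pvRules, List.foldl, List.any]
      · have e1 : (".pdf" == ext) = false := by simp [Ne.symm h1]
        have e2 : (".csv" == ext) = false := by simp [Ne.symm h2]
        have e3 : (".txt" == ext) = false := by simp [Ne.symm h3]
        simp [h1, h2, h3, pvRules, List.find?, e1, e2, e3, List.foldl, List.any, Option.elim]

-- ===== VERDICT (by name: the statement is the Claim_ definition above) =====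
theorem determine_source_type_spec : Claim_equal_determine_source_type := by
  intro file_info _
  unfold Spec_determine_source_type determine_source_type determine_source_type_alt
  exact core_eq _ _
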